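-- pv_equiv track=rewrite | github.com/stephenchenxj/myLeetCode | 675_CutOffTreesforGolfEvent.py | bfs
-- ===== SOURCE A (Python) =====
-- def bfs(fr,target, forest):
--     l = []
--     l.append((0,fr[0],fr[1]))
--     vis = set()
--     vis.add(fr)
--     ll = 0
--     while ll < len(l):
--         c, i, j = l[ll]
--         ll += 1
--         if (i,j) == target:
--             forest[i][j] = 1
--             return c
--         for x,y in [(i-1,j),(i,j-1),(i,j+1),(i+1,j)]:
--             if x >= 0 and x < len(forest) and y >= 0 and y < len(forest[0]) and (x,y) not in vis and forest[x][y] > 0: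
--                 l.append((c+1,x,y))
--                 vis.add((x,y))
--
--     return -1
-- ===== SOURCE B (Python) =====
-- def bfs(fr, target, forest):
--     # Level-by-level BFS: frontier list + level counter instead of per-node
--     # distances in a FIFO queue.  Same one-cell mutation of `forest` at the
--     # target as the original.
--     rows, cols = len(forest), len(forest[0])
--     frontier = [fr]
--     vis = {fr}
--     c = 0
--     while frontier:
--         if target in frontier:
--             forest[target[0]][target[1]] = 1
--             return c
--         nxt = []
--         for i, j in frontier:
--             for x, y in ((i - 1, j), (i, j - 1), (i, j + 1), (i + 1, j)):
--                 if 0 <= x < rows and 0 <= y < cols and (x, y) not in vis and forest[x][y] > 0: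
--                     nxt.append((x, y))
--                     vis.add((x, y))
--         frontier = nxt
--         c += 1
--     return -1
-- ===== Notes on version B (the rewrite author's own statement) =====
-- stated objective: alternative
-- what changed: Replaces the FIFO queue of (distance,i,j) triples scanned by a moving index with a level-synchronised BFS: a frontier list per level and a single level counter, checking the target by membership in the current frontier.
-- outside the precondition, e.g. on bfs((0, 4), (2879, 9), []): A returns -1, B raises IndexError; on bfs((0, 0), (9, 9), [[1, 1, 0], [0, 0, 1], [0]]): A returns -1, B returns -1; on bfs((5, 5), (5, 5), [[1]]): A raises IndexError, B raises IndexError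
import Mathlib
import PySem

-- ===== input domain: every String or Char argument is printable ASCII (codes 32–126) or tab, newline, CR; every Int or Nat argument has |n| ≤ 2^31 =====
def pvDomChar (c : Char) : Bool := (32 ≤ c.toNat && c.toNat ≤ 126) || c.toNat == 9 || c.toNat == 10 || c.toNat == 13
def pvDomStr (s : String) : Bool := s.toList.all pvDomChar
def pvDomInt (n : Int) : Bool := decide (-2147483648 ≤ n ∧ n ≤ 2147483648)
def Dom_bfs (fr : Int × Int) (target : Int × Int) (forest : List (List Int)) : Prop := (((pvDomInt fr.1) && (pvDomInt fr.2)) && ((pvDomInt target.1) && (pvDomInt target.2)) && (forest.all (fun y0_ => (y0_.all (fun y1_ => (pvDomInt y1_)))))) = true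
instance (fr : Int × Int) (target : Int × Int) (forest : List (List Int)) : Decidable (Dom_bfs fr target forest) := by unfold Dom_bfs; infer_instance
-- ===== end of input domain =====

-- B replaces the FIFO queue of (distance,i,j) triples with a level-by-level frontier BFS and a
-- level counter (same return value; both Pythons mutate only forest[target] right before a
-- non-(-1) return, and the equivalence proved here is about the return value).


-- ===== PORT A =====
-- the neighbour list [(i-1,j),(i,j-1),(i,j+1),(i+1,j)]
def pvNbrs (i j : Int) : List (Int × Int) := [(i - 1, j), (i, j - 1), (i, j + 1), (i + 1, j)]

-- forest[x][y], total form; both Pythons evaluate it only under the preceding guards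
-- 0 <= x < len(forest) and 0 <= y, and inside Pre_ every access that actually happens also has
-- y < len(forest[x]), where this equals Python's forest[x][y] exactly
def pvCell (forest : List (List Int)) (x y : Int) : Int :=
  (forest.getD x.toNat []).getD y.toNat 0

-- the shared acceptance test of both Pythons, in A's evaluation order:
-- x>=0 and x<len(forest) and y>=0 and y<len(forest[0]) and (x,y) not in vis and forest[x][y]>0
def pvCond (forest : List (List Int)) (vis : PySem.Set (Int × Int)) (xy : Int × Int) : Bool :=
  decide (0 ≤ xy.1) && decide (xy.1 < (forest.length : Int)) &&
  decide (0 ≤ xy.2) && decide (xy.2 < ((forest.headD []).length : Int)) &&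
  !(PySem.Set.contains vis xy) && decide (0 < pvCell forest xy.1 xy.2)

-- body of A's inner `for x,y in [...]` loop (appends tagged (c+1,x,y) and marks visited)
def pvStepA (forest : List (List Int)) (c : Int)
    (st : List (Int × Int × Int) × PySem.Set (Int × Int)) (xy : Int × Int) :
    List (Int × Int × Int) × PySem.Set (Int × Int) :=
  match st with
  | (l, vis) =>
    if pvCond forest vis xy then (l ++ [(c + 1, xy.1, xy.2)], PySem.Set.add vis xy) else (l, vis)

-- A's `while ll < len(l)` loop; fuel is a totality guard only (len(forest)*len(forest[0])+2
-- provably bounds the number of iterations, see the proofs below)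
def pvLoopA (target : Int × Int) (forest : List (List Int)) (l : List (Int × Int × Int))
    (ll : Nat) (vis : PySem.Set (Int × Int)) (fuel : Nat) : Int :=
  match fuel with
  | 0 => -1
  | fuel' + 1 =>
    if h : ll < l.length then
      let t := l[ll]
      if (t.2.1, t.2.2) = target then t.1
      else
        match (pvNbrs t.2.1 t.2.2).foldl (pvStepA forest t.1) (l, vis) with
        | (l', vis') => pvLoopA target forest l' (ll + 1) vis' fuel'
    else -1

def bfs (fr : Int × Int) (target : Int × Int) (forest : List (List Int)) : Int :=
  pvLoopA target forest [(0, fr.1, fr.2)] 0 (PySem.Set.ofList [fr])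
    (forest.length * (forest.headD []).length + 2)

-- ===== PORT B =====
-- body of B's inner `for x,y in (...)` loop (appends untagged (x,y) and marks visited)
def pvStepB (forest : List (List Int))
    (st : List (Int × Int) × PySem.Set (Int × Int)) (xy : Int × Int) :
    List (Int × Int) × PySem.Set (Int × Int) :=
  match st with
  | (l, vis) =>
    if pvCond forest vis xy then (l ++ [xy], PySem.Set.add vis xy) else (l, vis)

-- B's `for i,j in frontier: for x,y in (...)` double loop gathering the next frontier
def pvGather (forest : List (List Int)) (frontier : List (Int × Int))
    (st : List (Int × Int) × PySem.Set (Int × Int)) :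
    List (Int × Int) × PySem.Set (Int × Int) :=
  frontier.foldl (fun st p => (pvNbrs p.1 p.2).foldl (pvStepB forest) st) st

-- B's `while frontier` loop; same totality-guard fuel
def pvLoopB (target : Int × Int) (forest : List (List Int)) (frontier : List (Int × Int))
    (vis : PySem.Set (Int × Int)) (c : Int) (fuel : Nat) : Int :=
  match fuel with
  | 0 => -1
  | fuel' + 1 =>
    match frontier with
    | [] => -1
    | _ :: _ =>
      if target ∈ frontier then c
      else
        match pvGather forest frontier ([], vis) with
        | (nxt, vis') => pvLoopB target forest nxt vis' (c + 1) fuel'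

def bfs_alt (fr : Int × Int) (target : Int × Int) (forest : List (List Int)) : Int :=
  pvLoopB target forest [fr] (PySem.Set.ofList [fr]) 0
    (forest.length * (forest.headD []).length + 2)

-- ===== PRECONDITION & SPEC =====
-- Pre_ excludes, in closed form: the empty forest (there A happens to return -1 when fr != target
-- only because its bounds test short-circuits before len(forest[0]), while B's natural
-- rows/cols precomputation raises IndexError, and A itself raises when fr == target); fr == target
-- with fr not a valid (possibly negative) Python index (forest[i][j] = 1 raises IndexError);
-- and ragged forests in which some missing cell
-- (x,y) of a row shorter than row 0 has fr or a readable positive cell as a neighbour (reading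
-- forest[x][y] raises IndexError once a neighbour is popped) — unless every in-bounds neighbour
-- of fr is readable and non-positive, in which case only fr is ever popped and A returns safely.
-- Exact reachability is not closed-form, so this over-excludes cases where the positive cell
-- next to a missing one is itself unreachable.
def Pre_bfs (fr : Int × Int) (target : Int × Int) (forest : List (List Int)) : Prop :=
  forest ≠ [] ∧
  (fr = target →
    ((PySem.List.pyGet? forest fr.1).bind (fun row => PySem.List.pyGet? row fr.2)).isSome = true) ∧
  ((∀ x ∈ List.range forest.length, ∀ y ∈ List.range (forest.headD []).length,
    (forest.getD x []).length ≤ y →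
    ∀ nb ∈ [((x : Int) - 1, (y : Int)), ((x : Int), (y : Int) - 1),
            ((x : Int), (y : Int) + 1), ((x : Int) + 1, (y : Int))],
      nb ≠ fr ∧ ¬ (0 ≤ nb.1 ∧ nb.1 < (forest.length : Int) ∧ 0 ≤ nb.2 ∧
        nb.2 < ((forest.headD []).length : Int) ∧
        nb.2 < ((forest.getD nb.1.toNat []).length : Int) ∧
        0 < (forest.getD nb.1.toNat []).getD nb.2.toNat 0)) ∨
   (fr ≠ target ∧
    ∀ nb ∈ [(fr.1 - 1, fr.2), (fr.1, fr.2 - 1), (fr.1, fr.2 + 1), (fr.1 + 1, fr.2)],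
      (0 ≤ nb.1 ∧ nb.1 < (forest.length : Int) ∧ 0 ≤ nb.2 ∧
        nb.2 < ((forest.headD []).length : Int)) →
      nb.2 < ((forest.getD nb.1.toNat []).length : Int) ∧
        (forest.getD nb.1.toNat []).getD nb.2.toNat 0 ≤ 0))
instance (fr : Int × Int) (target : Int × Int) (forest : List (List Int)) : Decidable (Pre_bfs fr target forest) := by unfold Pre_bfs; infer_instance

def pvWitness_bfs : (Int × Int) × (Int × Int) × List (List Int) := ((0, 0), (1, 1), [[1, 1], [1, 1]])

def Spec_bfs (fr : Int × Int) (target : Int × Int) (forest : List (List Int)) (out : Int) : Prop := out = bfs_alt fr target forest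
instance (fr : Int × Int) (target : Int × Int) (forest : List (List Int)) (out : Int) : Decidable (Spec_bfs fr target forest out) := by unfold Spec_bfs; infer_instance

-- ===== CLAIM (what is proved, stated in full; the proofs are below) =====
def Claim_equal_bfs : Prop := ∀ (fr : Int × Int) (target : Int × Int) (forest : List (List Int)), Dom_bfs fr target forest → Pre_bfs fr target forest → Spec_bfs fr target forest (bfs fr target forest)

-- ===== LEMMAS AND PROOFS =====

-- proof-side view of A's loop: only the pending part l.drop ll of the queue matters
def pvLoopP (target : Int × Int) (forest : List (List Int)) (pending : List (Int × Int × Int))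
    (vis : PySem.Set (Int × Int)) (fuel : Nat) : Int :=
  match fuel with
  | 0 => -1
  | fuel' + 1 =>
    match pending with
    | [] => -1
    | t :: rest =>
      if (t.2.1, t.2.2) = target then t.1
      else
        match (pvNbrs t.2.1 t.2.2).foldl (pvStepA forest t.1) (rest, vis) with
        | (p', vis') => pvLoopP target forest p' vis' fuel'

def pvTag (c : Int) (p : Int × Int) : Int × Int × Int := (c, p.1, p.2)

-- invariant on vis: distinct elements, each the start cell or in bounds
def pvInv (fr : Int × Int) (forest : List (List Int)) (vis : List (Int × Int)) : Prop :=
  vis.Nodup ∧ ∀ p ∈ vis, p = fr ∨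
    (0 ≤ p.1 ∧ p.1 < (forest.length : Int) ∧ 0 ≤ p.2 ∧ p.2 < ((forest.headD []).length : Int))

theorem pvFoldA_append (forest : List (List Int)) (c : Int) (ns : List (Int × Int)) :
    ∀ (L : List (Int × Int × Int)) (vis : PySem.Set (Int × Int)),
    ns.foldl (pvStepA forest c) (L, vis) =
      (L ++ (ns.foldl (pvStepA forest c) ([], vis)).1, (ns.foldl (pvStepA forest c) ([], vis)).2) := by
  induction ns with
  | nil => intro L vis; simp [List.foldl]
  | cons n ns ih =>
    intro L vis
    simp only [List.foldl]
    by_cases h : pvCond forest vis n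
    · rw [show pvStepA forest c (L, vis) n = (L ++ [(c+1, n.1, n.2)], PySem.Set.add vis n) by
        simp [pvStepA, h],
        show pvStepA forest c ([], vis) n = ([(c+1, n.1, n.2)], PySem.Set.add vis n) by
        simp [pvStepA, h], ih, ih [(c+1, n.1, n.2)]]
      simp
    · rw [show pvStepA forest c (L, vis) n = (L, vis) by simp [pvStepA, h],
        show pvStepA forest c ([], vis) n = ([], vis) by simp [pvStepA, h]]
      exact ih L vis

theorem pvFoldB_append (forest : List (List Int)) (ns : List (Int × Int)) :
    ∀ (L : List (Int × Int)) (vis : PySem.Set (Int × Int)),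
    ns.foldl (pvStepB forest) (L, vis) =
      (L ++ (ns.foldl (pvStepB forest) ([], vis)).1, (ns.foldl (pvStepB forest) ([], vis)).2) := by
  induction ns with
  | nil => intro L vis; simp [List.foldl]
  | cons n ns ih =>
    intro L vis
    simp only [List.foldl]
    by_cases h : pvCond forest vis n
    · rw [show pvStepB forest (L, vis) n = (L ++ [n], PySem.Set.add vis n) by simp [pvStepB, h],
        show pvStepB forest ([], vis) n = ([n], PySem.Set.add vis n) by simp [pvStepB, h],
        ih, ih [n]]
      simp
    · rw [show pvStepB forest (L, vis) n = (L, vis) by simp [pvStepB, h],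
        show pvStepB forest ([], vis) n = ([], vis) by simp [pvStepB, h]]
      exact ih L vis

-- A's inner fold is B's inner fold with the (c+1) tag
theorem pvFoldAB (forest : List (List Int)) (c : Int) (ns : List (Int × Int)) :
    ∀ (vis : PySem.Set (Int × Int)),
    ns.foldl (pvStepA forest c) ([], vis) =
      ((ns.foldl (pvStepB forest) ([], vis)).1.map (pvTag (c + 1)),
       (ns.foldl (pvStepB forest) ([], vis)).2) := by
  induction ns with
  | nil => intro vis; simp [List.foldl]
  | cons n ns ih =>
    intro vis
    simp only [List.foldl]
    by_cases h : pvCond forest vis n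
    · rw [show pvStepA forest c ([], vis) n = ([(c+1, n.1, n.2)], PySem.Set.add vis n) by
        simp [pvStepA, h],
        show pvStepB forest ([], vis) n = ([n], PySem.Set.add vis n) by simp [pvStepB, h],
        pvFoldA_append, pvFoldB_append, ih]
      simp [pvTag]
    · rw [show pvStepA forest c ([], vis) n = ([], vis) by simp [pvStepA, h],
        show pvStepB forest ([], vis) n = ([], vis) by simp [pvStepB, h]]
      exact ih vis

theorem pvGather_append (forest : List (List Int)) (fs : List (Int × Int)) :
    ∀ (L : List (Int × Int)) (vis : PySem.Set (Int × Int)),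
    pvGather forest fs (L, vis) =
      (L ++ (pvGather forest fs ([], vis)).1, (pvGather forest fs ([], vis)).2) := by
  induction fs with
  | nil => intro L vis; simp [pvGather]
  | cons p fs ih =>
    intro L vis
    simp only [pvGather, List.foldl]
    rw [pvFoldB_append forest _ L vis]
    have h1 := ih (L ++ ((pvNbrs p.1 p.2).foldl (pvStepB forest) ([], vis)).1)
      ((pvNbrs p.1 p.2).foldl (pvStepB forest) ([], vis)).2
    have h2 := ih ((pvNbrs p.1 p.2).foldl (pvStepB forest) ([], vis)).1
      ((pvNbrs p.1 p.2).foldl (pvStepB forest) ([], vis)).2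
    simp only [pvGather] at h1 h2
    rw [h1, h2]
    simp

-- growth + invariant preservation for the per-cell fold
theorem pvFoldB_inv (fr : Int × Int) (forest : List (List Int)) (ns : List (Int × Int)) :
    ∀ (vis : PySem.Set (Int × Int)), pvInv fr forest vis →
      pvInv fr forest (ns.foldl (pvStepB forest) ([], vis)).2 ∧
      (ns.foldl (pvStepB forest) ([], vis)).2.length =
        vis.length + (ns.foldl (pvStepB forest) ([], vis)).1.length := by
  induction ns with
  | nil => intro vis hv; simpa [List.foldl] using hv
  | cons n ns ih =>
    intro vis hv
    simp only [List.foldl]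
    by_cases h : pvCond forest vis n
    · have h' := h
      simp only [pvCond, Bool.and_eq_true, Bool.not_eq_true', decide_eq_true_eq] at h'
      have hnm : n ∉ vis := by
        have := h'.1.2
        simpa using this
      have hadd : PySem.Set.add vis n = vis ++ [n] := PySem.Set.add_of_not_mem hnm
      have hbnd : 0 ≤ n.1 ∧ n.1 < (forest.length : Int) ∧ 0 ≤ n.2 ∧
          n.2 < ((forest.headD []).length : Int) :=
        ⟨h'.1.1.1.1.1, h'.1.1.1.1.2, h'.1.1.1.2, h'.1.1.2⟩
      have hv' : pvInv fr forest (PySem.Set.add vis n) := by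
        rw [hadd]
        constructor
        · exact hv.1.append (List.nodup_singleton n) (by simpa using fun h' => hnm h')
        · intro p hp
          rcases List.mem_append.mp hp with hp | hp
          · exact hv.2 p hp
          · simp at hp; subst hp; exact Or.inr hbnd
      rw [show pvStepB forest ([], vis) n = ([n], PySem.Set.add vis n) by simp [pvStepB, h],
        pvFoldB_append]
      refine ⟨(ih (PySem.Set.add vis n) hv').1, ?_⟩
      have := (ih (PySem.Set.add vis n) hv').2
      rw [this]
      have : (PySem.Set.add vis n).length = vis.length + 1 := by rw [hadd]; simp
      rw [this]; simp; omega
    · rw [show pvStepB forest ([], vis) n = ([], vis) by simp [pvStepB, h]]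
      exact ih vis hv

-- growth + invariant preservation for the whole gather
theorem pvGather_inv (fr : Int × Int) (forest : List (List Int)) (fs : List (Int × Int)) :
    ∀ (vis : PySem.Set (Int × Int)), pvInv fr forest vis →
      pvInv fr forest (pvGather forest fs ([], vis)).2 ∧
      (pvGather forest fs ([], vis)).2.length =
        vis.length + (pvGather forest fs ([], vis)).1.length := by
  induction fs with
  | nil => intro vis hv; simpa [pvGather] using hv
  | cons p fs ih =>
    intro vis hv
    simp only [pvGather, List.foldl]
    obtain ⟨hv1, hlen1⟩ := pvFoldB_inv fr forest (pvNbrs p.1 p.2) vis hv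
    set st1 := (pvNbrs p.1 p.2).foldl (pvStepB forest) ([], vis) with hst1
    have hg : fs.foldl (fun st p => (pvNbrs p.1 p.2).foldl (pvStepB forest) st) (st1.1, st1.2) =
        (st1.1 ++ (pvGather forest fs ([], st1.2)).1, (pvGather forest fs ([], st1.2)).2) := by
      have := pvGather_append forest fs st1.1 st1.2
      simpa [pvGather] using this
    obtain ⟨hv2, hlen2⟩ := ih st1.2 hv1
    constructor
    · have : st1 = (st1.1, st1.2) := rfl
      rw [← this] at hg; rw [hg]; exact hv2
    · have : st1 = (st1.1, st1.2) := rfl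
      rw [← this] at hg; rw [hg]
      simp only [List.length_append]
      omega

-- all cells of the grid plus the start cell
def pvAllCells (fr : Int × Int) (forest : List (List Int)) : List (Int × Int) :=
  ((List.range forest.length).flatMap
    (fun (a : Nat) => (List.range (forest.headD []).length).map
      (fun (b : Nat) => (((a : Nat) : Int), ((b : Nat) : Int))))) ++ [fr]

theorem pvInv_card (fr : Int × Int) (forest : List (List Int)) (vis : List (Int × Int))
    (hv : pvInv fr forest vis) :
    vis.length ≤ forest.length * (forest.headD []).length + 1 := by
  have hsub : vis ⊆ pvAllCells fr forest := by
    intro p hp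
    rcases hv.2 p hp with h | ⟨h1, h2, h3, h4⟩
    · subst h; simp [pvAllCells]
    · apply List.mem_append.mpr; left
      rw [List.mem_flatMap]
      refine ⟨p.1.toNat, List.mem_range.mpr (by omega), ?_⟩
      rw [List.mem_map]
      refine ⟨p.2.toNat, List.mem_range.mpr (by omega), ?_⟩
      exact Prod.ext_iff.mpr ⟨Int.toNat_of_nonneg h1, Int.toNat_of_nonneg h3⟩
  have hcard : vis.length ≤ (pvAllCells fr forest).length := by
    have h1 : vis.toFinset.card = vis.length := List.toFinset_card_of_nodup hv.1
    have h2 : vis.toFinset ⊆ (pvAllCells fr forest).toFinset := by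
      intro x hx
      rw [List.mem_toFinset] at hx ⊢
      exact hsub hx
    calc vis.length = vis.toFinset.card := h1.symm
      _ ≤ (pvAllCells fr forest).toFinset.card := Finset.card_le_card h2
      _ ≤ (pvAllCells fr forest).length := (pvAllCells fr forest).toFinset_card_le
  have hlen : (pvAllCells fr forest).length = forest.length * (forest.headD []).length + 1 := by
    simp [pvAllCells, List.length_flatMap, List.map_const']
  omega

-- A's real loop only depends on the pending part of the queue
theorem pvLoopA_drop (target : Int × Int) (forest : List (List Int)) :
    ∀ (fuel : Nat) (l : List (Int × Int × Int)) (ll : Nat) (vis : PySem.Set (Int × Int)),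
    ll ≤ l.length →
    pvLoopA target forest l ll vis fuel = pvLoopP target forest (l.drop ll) vis fuel := by
  intro fuel
  induction fuel with
  | zero => intro l ll vis _; rfl
  | succ fuel ih =>
    intro l ll vis hle
    by_cases h : ll < l.length
    · have hdrop : l.drop ll = l[ll] :: l.drop (ll + 1) := List.drop_eq_getElem_cons h
      rw [show pvLoopA target forest l ll vis (fuel + 1) =
          (if (l[ll].2.1, l[ll].2.2) = target then l[ll].1
           else
             pvLoopA target forest
               ((pvNbrs l[ll].2.1 l[ll].2.2).foldl (pvStepA forest l[ll].1) (l, vis)).1 (ll + 1)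
               ((pvNbrs l[ll].2.1 l[ll].2.2).foldl (pvStepA forest l[ll].1) (l, vis)).2 fuel) by
        simp [pvLoopA, h]]
      rw [hdrop]
      rw [show pvLoopP target forest (l[ll] :: l.drop (ll+1)) vis (fuel + 1) =
          (if (l[ll].2.1, l[ll].2.2) = target then l[ll].1
           else
             pvLoopP target forest
               ((pvNbrs l[ll].2.1 l[ll].2.2).foldl (pvStepA forest l[ll].1) (l.drop (ll+1), vis)).1
               ((pvNbrs l[ll].2.1 l[ll].2.2).foldl (pvStepA forest l[ll].1) (l.drop (ll+1), vis)).2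
               fuel) by
        simp [pvLoopP]]
      by_cases ht : (l[ll].2.1, l[ll].2.2) = target
      · simp [ht]
      · simp only [ht, if_false]
        rw [pvFoldA_append, pvFoldA_append forest l[ll].1 _ (l.drop (ll+1)) vis]
        rw [ih _ (ll + 1) _ (by simp; omega)]
        congr 1
        rw [List.drop_append_of_le_length (by omega)]
    · have h1 : ll = l.length := by omega
      have h2 : l.drop ll = [] := by rw [h1]; simp
      rw [h2]
      simp [pvLoopA, pvLoopP, h]

theorem pvLoopP_nil (target : Int × Int) (forest : List (List Int))
    (vis : PySem.Set (Int × Int)) (fuel : Nat) :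
    pvLoopP target forest [] vis fuel = -1 := by
  cases fuel <;> rfl

theorem pvLoopB_nil (target : Int × Int) (forest : List (List Int))
    (vis : PySem.Set (Int × Int)) (c : Int) (fuel : Nat) :
    pvLoopB target forest [] vis c fuel = -1 := by
  cases fuel <;> rfl

-- if the target is in the current level, A's loop returns the level number c
theorem pvLevelHit (target : Int × Int) (forest : List (List Int)) :
    ∀ (curr acc : List (Int × Int)) (vis : PySem.Set (Int × Int)) (c : Int) (fuel : Nat),
    target ∈ curr → curr.length ≤ fuel →
    pvLoopP target forest (curr.map (pvTag c) ++ acc.map (pvTag (c + 1))) vis fuel = c := by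
  intro curr
  induction curr with
  | nil => intro acc vis c fuel h; exact absurd h (List.not_mem_nil)
  | cons p rest ih =>
    intro acc vis c fuel hmem hfuel
    obtain ⟨fuel', rfl⟩ : ∃ f, fuel = f + 1 := ⟨fuel - 1, by simp at hfuel; omega⟩
    rw [show (p :: rest).map (pvTag c) ++ acc.map (pvTag (c+1)) =
        pvTag c p :: (rest.map (pvTag c) ++ acc.map (pvTag (c+1))) by simp]
    by_cases hp : p = target
    · simp [pvLoopP, pvTag, hp]
    · have hmem' : target ∈ rest := by
        rcases List.mem_cons.mp hmem with h | h
        · exact absurd h.symm hp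
        · exact h
      rw [show pvLoopP target forest
            (pvTag c p :: (rest.map (pvTag c) ++ acc.map (pvTag (c+1)))) vis (fuel' + 1) =
          pvLoopP target forest
            ((pvNbrs p.1 p.2).foldl (pvStepA forest c)
              (rest.map (pvTag c) ++ acc.map (pvTag (c+1)), vis)).1
            ((pvNbrs p.1 p.2).foldl (pvStepA forest c)
              (rest.map (pvTag c) ++ acc.map (pvTag (c+1)), vis)).2 fuel' by
        simp [pvLoopP, pvTag, hp]]
      rw [pvFoldA_append, pvFoldAB]
      rw [List.append_assoc, ← List.map_append]
      exact ih (acc ++ ((pvNbrs p.1 p.2).foldl (pvStepB forest) ([], vis)).1) _ c fuel' hmem'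
        (by simp at hfuel ⊢; omega)

-- if the target is not in the current level, A's loop consumes the level and reaches
-- exactly B's gathered next level
theorem pvLevelStep (target : Int × Int) (forest : List (List Int)) :
    ∀ (curr acc : List (Int × Int)) (vis : PySem.Set (Int × Int)) (c : Int) (fuel : Nat),
    target ∉ curr →
    pvLoopP target forest (curr.map (pvTag c) ++ acc.map (pvTag (c + 1))) vis
        (fuel + curr.length) =
      pvLoopP target forest ((pvGather forest curr (acc, vis)).1.map (pvTag (c + 1)))
        (pvGather forest curr (acc, vis)).2 fuel := by
  intro curr
  induction curr with
  | nil => intro acc vis c fuel _; simp [pvGather]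
  | cons p rest ih =>
    intro acc vis c fuel hnmem
    have hp : p ≠ target := fun h => hnmem (h ▸ List.mem_cons_self)
    have hp' : ((p.1, p.2) : Int × Int) ≠ target := by simpa using hp
    have hrest : target ∉ rest := fun h => hnmem (List.mem_cons_of_mem p h)
    rw [show fuel + (p :: rest).length = (fuel + rest.length) + 1 by simp; omega]
    rw [show (p :: rest).map (pvTag c) ++ acc.map (pvTag (c+1)) =
        pvTag c p :: (rest.map (pvTag c) ++ acc.map (pvTag (c+1))) by simp]
    rw [show pvLoopP target forest
          (pvTag c p :: (rest.map (pvTag c) ++ acc.map (pvTag (c+1)))) vis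
          ((fuel + rest.length) + 1) =
        pvLoopP target forest
          ((pvNbrs p.1 p.2).foldl (pvStepA forest c)
            (rest.map (pvTag c) ++ acc.map (pvTag (c+1)), vis)).1
          ((pvNbrs p.1 p.2).foldl (pvStepA forest c)
            (rest.map (pvTag c) ++ acc.map (pvTag (c+1)), vis)).2 (fuel + rest.length) by
      simp [pvLoopP, pvTag, hp']]
    rw [pvFoldA_append, pvFoldAB]
    rw [List.append_assoc, ← List.map_append]
    rw [show pvGather forest (p :: rest) (acc, vis) =
        pvGather forest rest (acc ++ ((pvNbrs p.1 p.2).foldl (pvStepB forest) ([], vis)).1,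
          ((pvNbrs p.1 p.2).foldl (pvStepB forest) ([], vis)).2) by
      simp only [pvGather, List.foldl]
      rw [pvFoldB_append forest (pvNbrs p.1 p.2) acc vis]]
    exact ih (acc ++ ((pvNbrs p.1 p.2).foldl (pvStepB forest) ([], vis)).1) _ c fuel hrest

-- the main simulation: level-synchronised B equals A, given enough fuel on both sides
theorem pvSim (target : Int × Int) (forest : List (List Int)) (fr : Int × Int) :
    ∀ (fuelB : Nat) (frontier : List (Int × Int)) (vis : PySem.Set (Int × Int)) (c : Int)
      (fuelA : Nat),
    pvInv fr forest vis →
    frontier.length + (forest.length * (forest.headD []).length + 1 - vis.length) ≤ fuelA →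
    1 + (forest.length * (forest.headD []).length + 1 - vis.length) ≤ fuelB →
    pvLoopP target forest (frontier.map (pvTag c)) vis fuelA =
      pvLoopB target forest frontier vis c fuelB := by
  intro fuelB
  induction fuelB with
  | zero => intro frontier vis c fuelA _ _ h; omega
  | succ fuelB ih =>
    intro frontier vis c fuelA hinv hA hB
    match frontier with
    | [] => simp only [List.map_nil]; rw [pvLoopP_nil, pvLoopB_nil]
    | q :: qs =>
      by_cases htgt : target ∈ q :: qs
      · rw [show pvLoopB target forest (q :: qs) vis c (fuelB + 1) = c by
          simp [pvLoopB, htgt]]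
        have := pvLevelHit target forest (q :: qs) [] vis c fuelA htgt (by simp at hA ⊢; omega)
        simpa using this
      · rw [show pvLoopB target forest (q :: qs) vis c (fuelB + 1) =
            pvLoopB target forest (pvGather forest (q :: qs) ([], vis)).1
              (pvGather forest (q :: qs) ([], vis)).2 (c + 1) fuelB by
          simp [pvLoopB, htgt]]
        have hfa : (q :: qs).length ≤ fuelA := by simp at hA ⊢; omega
        have hstep := pvLevelStep target forest (q :: qs) [] vis c
          (fuelA - (q :: qs).length) htgt
        rw [show fuelA - (q :: qs).length + (q :: qs).length = fuelA by omega] at hstep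
        have hlhs : pvLoopP target forest ((q :: qs).map (pvTag c)) vis fuelA =
            pvLoopP target forest ((pvGather forest (q :: qs) ([], vis)).1.map (pvTag (c+1)))
              (pvGather forest (q :: qs) ([], vis)).2 (fuelA - (q :: qs).length) := by
          have := hstep
          simpa using this
        rw [hlhs]
        match hg : (pvGather forest (q :: qs) ([], vis)).1 with
        | [] => simp only [List.map_nil]; rw [pvLoopP_nil, pvLoopB_nil]
        | r :: rs =>
          obtain ⟨hinv', hlen'⟩ := pvGather_inv fr forest (q :: qs) vis hinv
          have hcard := pvInv_card fr forest _ hinv'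
          rw [hg] at hlen'
          rw [hlen'] at hcard
          apply ih
          · exact hinv'
          · rw [hlen']
            simp only [List.length_cons] at hcard hA ⊢
            omega
          · rw [hlen']
            simp only [List.length_cons] at hcard hB ⊢
            omega

-- ===== VERDICT (by name: the statement is the Claim_ definition above) =====
theorem bfs_spec : Claim_equal_bfs := by
  intro fr target forest _ _
  unfold Spec_bfs bfs bfs_alt
  rw [pvLoopA_drop target forest _ _ 0 _ (by simp)]
  have hvis : (PySem.Set.ofList [fr] : List (Int × Int)) = [fr] := rfl
  have hinv : pvInv fr forest (PySem.Set.ofList [fr]) := by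
    unfold pvInv
    rw [hvis]
    exact ⟨List.nodup_singleton fr, fun p hp => Or.inl (by simpa using hp)⟩
  have hlen : (PySem.Set.ofList [fr] : List (Int × Int)).length = 1 := by rw [hvis]; rfl
  have := pvSim target forest fr (forest.length * (forest.headD []).length + 2) [fr]
    (PySem.Set.ofList [fr]) 0 (forest.length * (forest.headD []).length + 2) hinv
    (by rw [hlen]; simp; omega) (by rw [hlen]; simp; omega)
  simpa [pvTag] using this
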